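-- pv_equiv track=rewrite | github.com/glvov-bdai/IsaacLab | source/standalone/workflows/ray/wrap_isaac_ray_resources.py | split_commands
-- ===== SOURCE A (Python) =====
-- def split_commands(args):
--     """
--     Split commands and arguments by detecting .py scripts in the input args.
--     Group all arguments with the .py script until the next .py script.
--     """
--     commands = []
--     current_command = []
--
--     for arg in args:
--         if arg.endswith(".py"):
--             if current_command:
--                 commands.append(" ".join(current_command))
--             current_command = [arg]
--         else:
--             current_command.append(arg)
--
--     # Add the final command
--     if current_command:
--         commands.append(" ".join(current_command))
--
--     return commands
-- ===== SOURCE B (Python) =====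
-- def split_commands(args):
--     """
--     Split commands and arguments by detecting .py scripts in the input args.
--     Group all arguments with the .py script until the next .py script.
--     """
--     commands = []
--     n = len(args)
--     i = 0
--     while i < n:
--         j = i + 1
--         while j < n and not args[j].endswith(".py"):
--             j += 1
--         commands.append(" ".join(args[i:j]))
--         i = j
--     return commands
-- ===== Notes on version B (the rewrite author's own statement) =====
-- stated objective: alternative
-- what changed: B is a two-pointer scan over indices: for each segment start it advances a second pointer to the next .py boundary and slices/joins that window, instead of A's one-pass state machine with a flush-on-boundary accumulator and a duplicated final flush.
import Mathlib
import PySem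

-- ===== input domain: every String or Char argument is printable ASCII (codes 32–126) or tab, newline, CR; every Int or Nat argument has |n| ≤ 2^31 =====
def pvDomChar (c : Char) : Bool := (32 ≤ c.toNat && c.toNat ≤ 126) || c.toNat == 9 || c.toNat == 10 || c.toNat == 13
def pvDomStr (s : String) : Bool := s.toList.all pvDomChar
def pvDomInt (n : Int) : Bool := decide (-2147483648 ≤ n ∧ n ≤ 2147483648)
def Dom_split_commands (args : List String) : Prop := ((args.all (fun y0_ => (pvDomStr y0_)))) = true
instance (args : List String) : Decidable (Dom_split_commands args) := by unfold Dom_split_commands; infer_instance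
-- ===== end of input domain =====

-- B replaces A's flush-on-boundary accumulator (with its duplicated final flush) by a
-- two-pointer index scan that slices and joins one whole segment at a time.

-- ===== PORT A =====
-- state = (commands, current_command); final flush after the loop, as in A
def split_commands (args : List String) : List String :=
  let st := args.foldl
    (fun (st : List String × List String) arg =>
      if PySem.Str.endswith arg ".py" then
        (if st.2 ≠ [] then st.1 ++ [PySem.Str.join " " st.2] else st.1, [arg])
      else
        (st.1, st.2 ++ [arg]))
    ([], [])
  if st.2 ≠ [] then st.1 ++ [PySem.Str.join " " st.2] else st.1

-- ===== PORT B =====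
-- inner while loop of B: advance j to the next index holding a .py arg (or to n)
def pvAltInner (args : List String) (j : Nat) : Nat :=
  if h : j < args.length then
    if PySem.Str.endswith args[j] ".py" then j
    else pvAltInner args (j + 1)
  else j
termination_by args.length - j

theorem pvAltInner_ge (args : List String) (j : Nat) : j ≤ pvAltInner args j := by
  fun_induction pvAltInner args j with
  | case1 => exact Nat.le_refl _
  | case2 _ _ _ ih => omega
  | case3 => exact Nat.le_refl _

-- outer while loop of B: one iteration per segment [i:j)
def pvAltOuter (args : List String) (i : Nat) : List String :=
  if i < args.length then
    let j := pvAltInner args (i + 1)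
    PySem.Str.join " " (PySem.List.slice args (some (i : Int)) (some (j : Int))) ::
      pvAltOuter args j
  else []
termination_by args.length - i
decreasing_by
  have := pvAltInner_ge args (i + 1)
  omega

def split_commands_alt (args : List String) : List String := pvAltOuter args 0

-- ===== PRECONDITION & SPEC =====
def Spec_split_commands (args : List String) (out : List String) : Prop := out = split_commands_alt args
instance (args : List String) (out : List String) : Decidable (Spec_split_commands args out) := by unfold Spec_split_commands; infer_instance

-- ===== CLAIM (what is proved, stated in full; the proofs are below) =====
def Claim_equal_split_commands : Prop := ∀ (args : List String), Dom_split_commands args → Spec_split_commands args (split_commands args)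

-- ===== LEMMAS AND PROOFS =====

-- the predicate "does not end in .py", as a Bool
def pvNotPy (s : String) : Bool := !(PySem.Str.endswith s ".py")

-- list-structural middle man: both ports are proved equal to pvAltList
def pvAltList : List String → List String
  | [] => []
  | a :: rest =>
    PySem.Str.join " " (a :: rest.takeWhile pvNotPy) ::
      pvAltList (rest.dropWhile pvNotPy)
termination_by l => l.length
decreasing_by
  have := List.length_dropWhile_le (p := pvNotPy) (l := rest)
  simp only [List.length_cons]
  omega

theorem pvAltList_cons (a : String) (rest : List String) :
    pvAltList (a :: rest) =
      PySem.Str.join " " (a :: rest.takeWhile pvNotPy) ::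
        pvAltList (rest.dropWhile pvNotPy) := by
  rw [pvAltList.eq_def]

-- A's loop step and final flush, named for the proofs
def pvStep (st : List String × List String) (arg : String) : List String × List String :=
  if PySem.Str.endswith arg ".py" then
    (if st.2 ≠ [] then st.1 ++ [PySem.Str.join " " st.2] else st.1, [arg])
  else
    (st.1, st.2 ++ [arg])

def pvFinish (st : List String × List String) : List String :=
  if st.2 ≠ [] then st.1 ++ [PySem.Str.join " " st.2] else st.1

theorem split_commands_eq_finish (args : List String) :
    split_commands args = pvFinish (args.foldl pvStep ([], [])) := rfl

-- invariant of A's fold: finishing from a nonempty current command cur yields cur extended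
-- with the non-.py run, joined, followed by pvAltList on the remainder
theorem pvLoop (l : List String) : ∀ (cmds cur : List String), cur ≠ [] →
    pvFinish (l.foldl pvStep (cmds, cur)) =
      cmds ++ (PySem.Str.join " " (cur ++ l.takeWhile pvNotPy) ::
        pvAltList (l.dropWhile pvNotPy)) := by
  induction l with
  | nil =>
    intro cmds cur h
    simp [pvFinish, pvAltList, h]
  | cons a t ih =>
    intro cmds cur h
    by_cases hpy : PySem.Chars.endswith a.toList ['.', 'p', 'y'] = true
    · have hstep : pvStep (cmds, cur) a = (cmds ++ [PySem.Str.join " " cur], [a]) := by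
        simp [pvStep, PySem.Str.endswith, hpy, h]
      rw [List.foldl_cons, hstep, ih _ [a] (by simp)]
      simp [pvNotPy, PySem.Str.endswith, hpy, pvAltList_cons]
    · have hstep : pvStep (cmds, cur) a = (cmds, cur ++ [a]) := by
        simp [pvStep, PySem.Str.endswith, hpy]
      rw [List.foldl_cons, hstep, ih _ (cur ++ [a]) (by simp)]
      simp [pvNotPy, PySem.Str.endswith, hpy]

theorem pvA_eq_altList (args : List String) : split_commands args = pvAltList args := by
  cases args with
  | nil => simp [split_commands, pvAltList]
  | cons a rest =>
    rw [split_commands_eq_finish, List.foldl_cons]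
    have hstep : pvStep ([], []) a = ([], [a]) := by
      unfold pvStep; split <;> simp
    rw [hstep, pvLoop rest [] [a] (by simp), pvAltList_cons]
    simp

-- take (length of takeWhile) = takeWhile; drop (length of takeWhile) = dropWhile
theorem pvTakeTW {p : String → Bool} (l : List String) :
    l.take (l.takeWhile p).length = l.takeWhile p := by
  induction l with
  | nil => simp
  | cons a t ih =>
    by_cases hp : p a = true <;> simp [hp, ih]

theorem pvDropTW {p : String → Bool} (l : List String) :
    l.drop (l.takeWhile p).length = l.dropWhile p := by
  induction l with
  | nil => simp
  | cons a t ih =>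
    by_cases hp : p a = true <;> simp [hp, ih]

-- the inner pointer advances exactly over the non-.py run starting at j
theorem pvAltInner_spec (args : List String) (j : Nat) :
    pvAltInner args j = j + ((args.drop j).takeWhile pvNotPy).length := by
  fun_induction pvAltInner args j with
  | case1 j h hpy =>
    simp [PySem.Str.endswith] at hpy
    rw [List.drop_eq_getElem_cons h]
    simp [pvNotPy, PySem.Str.endswith, hpy]
  | case2 j h hpy ih =>
    simp [PySem.Str.endswith] at hpy
    rw [List.drop_eq_getElem_cons h, ih]
    simp only [List.takeWhile_cons, pvNotPy, PySem.Str.endswith]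
    rw [if_pos (by simp [hpy])]
    simp only [List.length_cons]
    omega
  | case3 j h =>
    have : args.length ≤ j := by omega
    simp [List.drop_eq_nil_of_le this]

-- the outer loop from index i computes pvAltList of the suffix from i
theorem pvAltOuter_spec (args : List String) (i : Nat) :
    pvAltOuter args i = pvAltList (args.drop i) := by
  fun_induction pvAltOuter args i with
  | case1 i h j ih =>
    set L := ((args.drop (i + 1)).takeWhile pvNotPy).length with hL
    have hj : pvAltInner args (i + 1) = (i + 1) + L := pvAltInner_spec args (i + 1)
    have hdropi : args.drop i = args[i] :: args.drop (i + 1) := List.drop_eq_getElem_cons h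
    have hslice : PySem.List.slice args (some (i : Int)) (some ((pvAltInner args (i + 1) : Nat) : Int))
        = args[i] :: (args.drop (i + 1)).takeWhile pvNotPy := by
      rw [PySem.List.slice_natCast, hj, hdropi]
      have : (i + 1) + L - i = L + 1 := by omega
      rw [this, List.take_succ_cons, pvTakeTW]
    have hdropj : args.drop (pvAltInner args (i + 1)) = (args.drop (i + 1)).dropWhile pvNotPy := by
      rw [hj, ← pvDropTW (p := pvNotPy) (l := args.drop (i + 1)), List.drop_drop, ← hL]
    rw [ih, hslice, hdropj, hdropi, pvAltList_cons]
  | case2 i h =>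
    have : args.length ≤ i := by omega
    simp [List.drop_eq_nil_of_le this, pvAltList]


-- ===== VERDICT (by name: the statement is the Claim_ definition above) =====
theorem split_commands_spec : Claim_equal_split_commands := by
  intro args _
  unfold Spec_split_commands split_commands_alt
  rw [pvA_eq_altList, pvAltOuter_spec]
  simp
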